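-- pv_equiv track=rewrite | github.com/louisaschill/Depression-Prediction | analyze_all_domains.py | is_redundant_variable
-- ===== SOURCE A (Python) =====
-- REDUNDANT_PATTERNS = {
--     'sex': ['sex', 'gender', 'male', 'female'],
--     'age': ['age', 'birth', 'dob', 'date_of_birth'],
--     'id': ['id', 'subject', 'participant', 'key'],
--     'anthropometric': ['anthro', 'height', 'weight', 'bmi', 'calc']  # Added anthropometric patterns
-- }
--
-- def is_redundant_variable(column_name):
--     """Check if a variable is redundant based on common patterns."""
--     column_lower = column_name.lower()
--
--     # Check for redundant patterns
--     for category, patterns in REDUNDANT_PATTERNS.items():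
--         if any(pattern in column_lower for pattern in patterns):
--             # For anthropometric measurements, only exclude if it's a calculated field
--             if category == 'anthropometric' and 'calc' not in column_lower:
--                 continue
--             return True
--
--     return False
-- ===== SOURCE B (Python) =====
-- # Flat single-pass form: the anthropometric category can only return True when
-- # 'calc' is present (otherwise the loop continues to the end and returns False),
-- # and 'date_of_birth' is subsumed by 'birth', so the nested category loop
-- # collapses to one scan over the effective patterns.
-- EFFECTIVE_PATTERNS = ('sex', 'gender', 'male', 'female',
--                       'age', 'birth', 'dob',
--                       'id', 'subject', 'participant', 'key',
--                       'calc')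
--
-- def is_redundant_variable(column_name):
--     column_lower = column_name.lower()
--     return any(pattern in column_lower for pattern in EFFECTIVE_PATTERNS)
-- ===== Notes on version B (the rewrite author's own statement) =====
-- stated objective: simpler
-- what changed: The nested category loop with its anthropometric special case is collapsed to a single flat scan over the twelve effective substring patterns (the anthropometric category can only return True when the calculated-field marker is present, and the date-of-birth pattern is subsumed by the birth pattern).
import Mathlib
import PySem

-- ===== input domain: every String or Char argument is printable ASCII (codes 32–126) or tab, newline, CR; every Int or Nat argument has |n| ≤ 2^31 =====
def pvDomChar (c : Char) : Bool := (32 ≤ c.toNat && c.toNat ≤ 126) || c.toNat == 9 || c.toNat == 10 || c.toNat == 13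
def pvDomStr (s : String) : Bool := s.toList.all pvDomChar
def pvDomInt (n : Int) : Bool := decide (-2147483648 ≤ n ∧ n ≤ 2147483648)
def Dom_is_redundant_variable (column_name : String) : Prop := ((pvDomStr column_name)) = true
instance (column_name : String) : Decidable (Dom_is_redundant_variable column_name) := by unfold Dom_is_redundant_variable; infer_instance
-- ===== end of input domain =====

-- B collapses A's nested category loop (with the anthropometric continue) to one flat
-- scan over the twelve effective patterns; objective: simpler, same return value.

-- ===== PORT A =====
-- REDUNDANT_PATTERNS: dict of category -> patterns, in insertion order
def redundantPatterns : List (String × List String) :=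
  [("sex", ["sex", "gender", "male", "female"]),
   ("age", ["age", "birth", "dob", "date_of_birth"]),
   ("id", ["id", "subject", "participant", "key"]),
   ("anthropometric", ["anthro", "height", "weight", "bmi", "calc"])]

-- the for-loop over categories with its continue / return True / fall-through return False
def redundantLoop (column_lower : String) : List (String × List String) → Bool
  | [] => false
  | (category, patterns) :: rest =>
    if patterns.any (fun pattern => PySem.Str.isIn pattern column_lower) then
      if category == "anthropometric" && !(PySem.Str.isIn "calc" column_lower) then
        redundantLoop column_lower rest
      else
        true
    else
      redundantLoop column_lower rest

def is_redundant_variable (column_name : String) : Bool :=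
  redundantLoop (PySem.Str.lower column_name) redundantPatterns

-- ===== PORT B =====
def effectivePatterns : List String :=
  ["sex", "gender", "male", "female", "age", "birth", "dob",
   "id", "subject", "participant", "key", "calc"]

def is_redundant_variable_alt (column_name : String) : Bool :=
  effectivePatterns.any (fun pattern => PySem.Str.isIn pattern (PySem.Str.lower column_name))

-- ===== PRECONDITION & SPEC =====
def Spec_is_redundant_variable (column_name : String) (out : Bool) : Prop := out = is_redundant_variable_alt column_name
instance (column_name : String) (out : Bool) : Decidable (Spec_is_redundant_variable column_name out) := by unfold Spec_is_redundant_variable; infer_instance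

-- ===== CLAIM (what is proved, stated in full; the proofs are below) =====
def Claim_equal_is_redundant_variable : Prop := ∀ (column_name : String), Dom_is_redundant_variable column_name → Spec_is_redundant_variable column_name (is_redundant_variable column_name)

-- ===== LEMMAS AND PROOFS =====

-- 'birth' is a substring of 'date_of_birth', so a 'date_of_birth' hit implies a 'birth' hit
theorem birth_of_dob (l : List Char) :
    PySem.Chars.isIn ['d','a','t','e','_','o','f','_','b','i','r','t','h'] l = true →
    PySem.Chars.isIn ['b','i','r','t','h'] l = true := by
  rw [PySem.Chars.isIn_iff_infix, PySem.Chars.isIn_iff_infix]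
  intro h
  exact List.IsInfix.trans (by decide) h

-- ===== VERDICT (by name: the statement is the Claim_ definition above) =====
theorem is_redundant_variable_spec : Claim_equal_is_redundant_variable := by
  intro column_name _
  unfold Spec_is_redundant_variable is_redundant_variable is_redundant_variable_alt
    redundantPatterns effectivePatterns
  set l := PySem.Str.lower column_name with hl
  cases hb : PySem.Chars.isIn ['b','i','r','t','h'] l.toList <;>
    cases hc : PySem.Chars.isIn ['c','a','l','c'] l.toList
  · have hd : PySem.Chars.isIn ['d','a','t','e','_','o','f','_','b','i','r','t','h'] l.toList = false := by
      by_contra h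
      simp only [Bool.not_eq_false] at h
      rw [birth_of_dob l.toList h] at hb; exact Bool.noConfusion hb
    simp [redundantLoop, hb, hc, hd, Bool.or_assoc]
  · have hd : PySem.Chars.isIn ['d','a','t','e','_','o','f','_','b','i','r','t','h'] l.toList = false := by
      by_contra h
      simp only [Bool.not_eq_false] at h
      rw [birth_of_dob l.toList h] at hb; exact Bool.noConfusion hb
    simp [redundantLoop, hb, hc, hd]
  · simp [redundantLoop, hb, hc]
  · simp [redundantLoop, hb, hc]
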